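-- pv_equiv track=rewrite | github.com/lawfullyillegal-droid/observer-patch-holography | tools/build_pdf.py | _fix_broken_math_braces
-- ===== SOURCE A (Python) =====
-- def _fix_broken_math_braces(tex):
--     """Fix broken $X_{...\\} patterns where \\} should be }."""
--     # Find $ that starts inline math with a subscript/superscript,
--     # where the closing brace is escaped as \}
--     lines = tex.split('\n')
--     fixed_lines = []
--
--     for line in lines:
--         if '$' in line and '\\}' in line:
--             line = _fix_line_broken_braces(line)
--         fixed_lines.append(line)
--
--     return '\n'.join(fixed_lines)
--
-- def _fix_line_broken_braces(line):
--     r"""Fix a single line with broken $...\} patterns."""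
--     i = 0
--     result = []
--     while i < len(line):
--         if line[i] == '$':
--             # Find the next $ (or end of line)
--             j = line.find('$', i + 1)
--             if j == -1:
--                 # Unclosed math - check if there's \} that should close it
--                 segment = line[i:]
--                 # Try to fix: replace \} with } and add closing $
--                 if '\\}' in segment and '_{' in segment:
--                     segment = segment.replace('\\}', '}')
--                     segment += '$'
--                 result.append(segment)
--                 break
--             else:
--                 result.append(line[i:j + 1])
--                 i = j + 1
--         else:
--             result.append(line[i])
--             i += 1
--     return ''.join(result)
-- ===== SOURCE B (Python) =====
-- def _fix_broken_math_braces(tex):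
--     """Fix broken $X_{...\\} patterns where \\} should be }."""
--     return '\n'.join(_fix_line(line) for line in tex.split('\n'))
--
-- def _fix_line(line):
--     # An unclosed inline-math tail exists iff the number of '$' is odd;
--     # under left-to-right pairing the orphan '$' is the last one.
--     if line.count('$') % 2 == 1:
--         k = line.rfind('$')
--         seg = line[k:]
--         if '\\}' in seg and '_{' in seg:
--             return line[:k] + seg.replace('\\}', '}') + '$'
--     return line
-- ===== Notes on version B (the rewrite author's own statement) =====
-- stated objective: simpler
-- what changed: The char-by-char scanning loop with a result buffer and find-based span pairing is replaced by a closed-form per-line computation: a '$'-parity check, rfind to locate the orphan '$', and slicing to rebuild the line.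
import Mathlib
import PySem

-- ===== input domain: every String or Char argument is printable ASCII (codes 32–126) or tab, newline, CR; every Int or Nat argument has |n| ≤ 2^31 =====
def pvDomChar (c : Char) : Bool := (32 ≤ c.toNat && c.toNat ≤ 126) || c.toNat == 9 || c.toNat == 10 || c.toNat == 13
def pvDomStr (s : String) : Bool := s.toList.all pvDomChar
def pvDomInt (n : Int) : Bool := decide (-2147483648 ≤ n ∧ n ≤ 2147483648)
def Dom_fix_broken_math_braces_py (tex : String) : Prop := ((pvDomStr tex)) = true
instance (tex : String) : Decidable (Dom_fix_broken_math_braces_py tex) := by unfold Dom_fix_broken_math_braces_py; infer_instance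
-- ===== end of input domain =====

-- B replaces A's char-by-char scan/buffer with a parity check + rfind + slicing per line (simpler; return value only, no mutation involved).

-- ===== PORT A =====
-- _fix_line_broken_braces: the while loop over index i is rendered as structural
-- recursion on the remaining suffix of the line (i ↦ dropping the consumed prefix);
-- line.find('$', i+1) becomes Chars.find on the suffix after the current char
-- (relative index j_rel, absolute j = i+1+j_rel; line[i:j+1] = c :: take (j_rel+1) rest).
def pvFixLineA : List Char → List Char
  | [] => []
  | c :: rest =>
    if c = '$' then
      let j := PySem.Chars.find rest ['$']
      if j = -1 then
        -- unclosed math: fix the tail segment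
        let segment := c :: rest
        if PySem.Chars.isIn ['\\','}'] segment && PySem.Chars.isIn ['_','{'] segment then
          PySem.Chars.replace segment ['\\','}'] ['}'] ++ ['$']
        else segment
      else
        (c :: rest.take (j.toNat + 1)) ++ pvFixLineA (rest.drop (j.toNat + 1))
    else c :: pvFixLineA rest
termination_by cs => cs.length
decreasing_by all_goals (simp; try omega)

def fix_broken_math_braces_py (tex : String) : String :=
  let lines := PySem.Chars.splitOn tex.toList ['\n']
  let fixed_lines := lines.foldl (fun acc line =>
    acc ++ [if PySem.Chars.isIn ['$'] line && PySem.Chars.isIn ['\\','}'] line then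
              pvFixLineA line
            else line]) []
  String.mk (PySem.Chars.join ['\n'] fixed_lines)

-- ===== PORT B =====
def pvFixLineB (cs : List Char) : List Char :=
  if PySem.Chars.count cs ['$'] % 2 = 1 then
    let k := PySem.Chars.rfind cs ['$']
    let seg := PySem.List.slice cs (some k) none
    if PySem.Chars.isIn ['\\','}'] seg && PySem.Chars.isIn ['_','{'] seg then
      PySem.List.slice cs none (some k) ++ PySem.Chars.replace seg ['\\','}'] ['}'] ++ ['$']
    else cs
  else cs

def fix_broken_math_braces_py_alt (tex : String) : String :=
  String.mk (PySem.Chars.join ['\n']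
    ((PySem.Chars.splitOn tex.toList ['\n']).map pvFixLineB))

-- ===== PRECONDITION & SPEC =====
def Spec_fix_broken_math_braces_py (tex : String) (out : String) : Prop := out = fix_broken_math_braces_py_alt tex
instance (tex : String) (out : String) : Decidable (Spec_fix_broken_math_braces_py tex out) := by unfold Spec_fix_broken_math_braces_py; infer_instance

-- ===== CLAIM (what is proved, stated in full; the proofs are below) =====
def Claim_equal_fix_broken_math_braces_py : Prop := ∀ (tex : String), Dom_fix_broken_math_braces_py tex → Spec_fix_broken_math_braces_py tex (fix_broken_math_braces_py tex)

-- ===== LEMMAS AND PROOFS =====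



theorem pv_count_go_singleton (a : Char) : ∀ (l : List Char) (fuel acc : Nat), l.length ≤ fuel →
    PySem.Chars.count.go [a] fuel l acc = acc + l.count a
  | [], fuel, acc, _ => by cases fuel <;> simp [PySem.Chars.count.go]
  | c :: t, fuel+1, acc, h => by
      rw [PySem.Chars.count.go]
      by_cases hc : c = a
      · simp [hc, List.isPrefixOf, pv_count_go_singleton a t fuel (acc+1) (by simpa using h)]
        omega
      · simp [List.isPrefixOf, Ne.symm hc, hc, pv_count_go_singleton a t fuel acc (by simpa using h)]

theorem pv_count_singleton (cs : List Char) (a : Char) :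
    PySem.Chars.count cs [a] = cs.count a := by
  simp [PySem.Chars.count, pv_count_go_singleton a cs cs.length 0 le_rfl]

theorem pv_rfind_go_succ (c a : Char) (cs : List Char) : ∀ (j : Nat),
    PySem.Chars.rfind.go (c :: cs) [a] (j+1) =
      (if PySem.Chars.rfind.go cs [a] j = -1 then (if c = a then 0 else -1)
       else 1 + PySem.Chars.rfind.go cs [a] j)
  | 0 => by
      simp only [PySem.Chars.rfind.go, List.drop_succ_cons, List.drop_zero]
      by_cases h : [a].isPrefixOf cs
      · simp [h]
      · rw [if_neg h, if_neg h]
        have hp : [a].isPrefixOf (c :: cs) = (a == c) := by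
          simp [List.isPrefixOf]
        rw [hp]
        by_cases hc : c = a
        · simp [hc]
        · simp [hc]
          exact fun e => hc (Eq.symm e)
  | j+1 => by
      rw [PySem.Chars.rfind.go]
      conv_rhs => rw [PySem.Chars.rfind.go]
      have hd : List.drop (j+1+1) (c :: cs) = List.drop (j+1) cs := by simp
      by_cases h : [a].isPrefixOf (List.drop (j+1) cs)
      · simp only [hd, h, if_true]
        push_cast
        split_ifs <;> omega
      · simp [hd, h, pv_rfind_go_succ c a cs j]

theorem pv_rfind_cons (c a : Char) (cs : List Char) :
    PySem.Chars.rfind (c :: cs) [a] =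
      (if PySem.Chars.rfind cs [a] = -1 then (if c = a then 0 else -1)
       else 1 + PySem.Chars.rfind cs [a]) := by
  simp [PySem.Chars.rfind, List.length_cons, pv_rfind_go_succ c a cs cs.length]

theorem pv_rfind_spec (a : Char) (cs : List Char) :
    (a ∈ cs → 0 ≤ PySem.Chars.rfind cs [a]) ∧ (a ∉ cs → PySem.Chars.rfind cs [a] = -1) := by
  induction cs with
  | nil => simp [PySem.Chars.rfind, PySem.Chars.rfind.go, List.isPrefixOf]
  | cons c t ih =>
      obtain ⟨ih1, ih2⟩ := ih
      rw [pv_rfind_cons]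
      by_cases hm : a ∈ t
      · have h1 := ih1 hm
        have hne : PySem.Chars.rfind t [a] ≠ -1 := by intro e; rw [e] at h1; norm_num at h1
        rw [if_neg hne]
        constructor
        · intro _; linarith
        · intro hn; exact absurd (List.mem_cons_of_mem c hm) hn
      · rw [if_pos (ih2 hm)]
        constructor
        · intro hmem
          have : a = c := by rcases List.mem_cons.mp hmem with h1 | h2; exact h1; exact absurd h2 hm
          simp [this]
        · intro hn
          have : ¬ c = a := fun e => hn (by simp [e])
          simp [this]

theorem pv_rfind_neg_iff (a : Char) (cs : List Char) :
    PySem.Chars.rfind cs [a] = -1 ↔ a ∉ cs := by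
  constructor
  · intro h hm
    have := (pv_rfind_spec a cs).1 hm
    rw [h] at this; norm_num at this
  · exact (pv_rfind_spec a cs).2

theorem pv_rfind_nonneg (a : Char) (cs : List Char) (h : a ∈ cs) :
    0 ≤ PySem.Chars.rfind cs [a] := (pv_rfind_spec a cs).1 h

theorem pv_rfind_append (xs ys : List Char) (a : Char) (h : a ∈ ys) :
    PySem.Chars.rfind (xs ++ ys) [a] = xs.length + PySem.Chars.rfind ys [a] := by
  induction xs with
  | nil => simp
  | cons c t ih =>
      have hne : PySem.Chars.rfind (t ++ ys) [a] ≠ -1 := by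
        rw [ne_eq, pv_rfind_neg_iff]; simp; exact fun _ => h
      rw [List.cons_append, pv_rfind_cons, if_neg hne, ih, List.length_cons]
      push_cast; ring

theorem pv_prefix_singleton (a : Char) (L : List Char) : [a] <+: L ↔ L.head? = some a := by
  cases L <;> simp [List.prefix_cons_iff, eq_comm]
theorem pv_infix_singleton (a : Char) (L : List Char) : [a] <:+: L ↔ a ∈ L := by
  constructor
  · intro h; exact List.singleton_sublist.mp h.sublist
  · intro h
    obtain ⟨s, t, rfl⟩ := List.append_of_mem h
    exact ⟨s, t, by simp⟩
theorem pv_isIn_singleton (a : Char) (cs : List Char) :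
    PySem.Chars.isIn [a] cs = true ↔ a ∈ cs := by
  rw [PySem.Chars.isIn_iff_infix, pv_infix_singleton]
-- find decomposition
theorem pv_find_decomp (a : Char) (rest : List Char) (h : 0 ≤ PySem.Chars.find rest [a]) :
    (PySem.Chars.find rest [a]).toNat < rest.length ∧
    rest[(PySem.Chars.find rest [a]).toNat]? = some a ∧
    rest = rest.take (PySem.Chars.find rest [a]).toNat ++ a :: rest.drop ((PySem.Chars.find rest [a]).toNat + 1) ∧
    a ∉ rest.take (PySem.Chars.find rest [a]).toNat := by
  obtain ⟨h1, h2⟩ := PySem.Chars.find_spec h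
  set j := (PySem.Chars.find rest [a]).toNat with hj
  have hhead : (rest.drop j).head? = some a := (pv_prefix_singleton a _).mp h1
  have hget : rest[j]? = some a := by
    rw [← List.head?_drop]; exact hhead
  have hlt : j < rest.length := by
    by_contra hge
    rw [List.getElem?_eq_none (by omega)] at hget; simp at hget
  refine ⟨hlt, hget, ?_, ?_⟩
  · conv_lhs => rw [← List.take_append_drop j rest]
    congr 1
    rw [← List.getElem_cons_drop (as := rest) (i := j) hlt]
    congr 1
    rw [List.getElem?_eq_getElem hlt] at hget
    exact Option.some.inj hget
  · intro hmem
    obtain ⟨i, hi, hgi⟩ := List.getElem_of_mem (l := rest.take j) hmem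
    have hilt : i < j := by simp at hi; omega
    apply h2 i hilt
    rw [pv_prefix_singleton, List.head?_drop, List.getElem?_eq_getElem (by omega)]
    rw [List.getElem_take] at hgi
    rw [hgi]

theorem pv_drop_len_add {α : Type} (xs ys : List α) (i : Nat) :
    (xs ++ ys).drop (xs.length + i) = ys.drop i := by
  induction xs with
  | nil => simp
  | cons c t ih => simpa [Nat.succ_add] using ih

theorem pv_take_len_add {α : Type} (xs ys : List α) (i : Nat) :
    (xs ++ ys).take (xs.length + i) = xs ++ ys.take i := by
  induction xs with
  | nil => simp
  | cons c t ih => simpa [Nat.succ_add] using ih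

theorem pv_B_even (cs : List Char) (h : cs.count '$' % 2 = 0) : pvFixLineB cs = cs := by
  simp only [pvFixLineB]
  rw [if_neg (by rw [pv_count_singleton]; omega)]

theorem pv_B_odd (cs : List Char) (h : cs.count '$' % 2 = 1) :
    pvFixLineB cs =
      (if PySem.Chars.isIn ['\\','}'] (cs.drop (PySem.Chars.rfind cs ['$']).toNat) &&
          PySem.Chars.isIn ['_','{'] (cs.drop (PySem.Chars.rfind cs ['$']).toNat) then
        cs.take (PySem.Chars.rfind cs ['$']).toNat ++
          PySem.Chars.replace (cs.drop (PySem.Chars.rfind cs ['$']).toNat) ['\\','}'] ['}'] ++ ['$']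
      else cs) := by
  have hmem : '$' ∈ cs := List.count_pos_iff.mp (by omega)
  have h0 := pv_rfind_nonneg '$' cs hmem
  simp only [pvFixLineB]
  rw [if_pos (by rw [pv_count_singleton]; exact h),
      PySem.List.slice_from _ h0, PySem.List.slice_to _ h0]

theorem pv_lineAB (cs : List Char) : pvFixLineA cs = pvFixLineB cs := by
  induction cs using pvFixLineA.induct with
  | case1 => simp [pvFixLineA, pvFixLineB, pv_count_singleton]
  | case2 rest j hj seg hcond =>
      have hj' : PySem.Chars.find rest ['$'] = -1 := hj
      have hnd : '$' ∉ rest := by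
        rw [PySem.Chars.find_eq_neg_one_iff] at hj'; rwa [pv_infix_singleton] at hj'
      have hcount : ('$'::rest).count '$' % 2 = 1 := by
        simp [List.count_cons, List.count_eq_zero.mpr hnd]
      have hrf : PySem.Chars.rfind ('$'::rest) ['$'] = 0 := by
        rw [pv_rfind_cons, if_pos ((pv_rfind_neg_iff _ _).mpr hnd)]; simp
      rw [pv_B_odd _ hcount, hrf]
      simp only [Int.toNat_zero, List.drop_zero, List.take_zero, List.nil_append]
      have hcond' : (PySem.Chars.isIn ['\\','}'] ('$'::rest) && PySem.Chars.isIn ['_','{'] ('$'::rest)) = true := hcond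
      rw [if_pos hcond']
      simp [pvFixLineA, hj', hcond']
  | case3 rest j hj seg hcond =>
      have hj' : PySem.Chars.find rest ['$'] = -1 := hj
      have hnd : '$' ∉ rest := by
        rw [PySem.Chars.find_eq_neg_one_iff] at hj'; rwa [pv_infix_singleton] at hj'
      have hcount : ('$'::rest).count '$' % 2 = 1 := by
        simp [List.count_cons, List.count_eq_zero.mpr hnd]
      have hrf : PySem.Chars.rfind ('$'::rest) ['$'] = 0 := by
        rw [pv_rfind_cons, if_pos ((pv_rfind_neg_iff _ _).mpr hnd)]; simp
      rw [pv_B_odd _ hcount, hrf]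
      simp only [Int.toNat_zero, List.drop_zero, List.take_zero, List.nil_append]
      have hcond' : ¬ (PySem.Chars.isIn ['\\','}'] ('$'::rest) && PySem.Chars.isIn ['_','{'] ('$'::rest)) = true := hcond
      rw [if_neg hcond']
      simp [pvFixLineA, hj', hcond']
  | case4 rest j hj ih =>
      have hj' : ¬ PySem.Chars.find rest ['$'] = -1 := hj
      have h0 : 0 ≤ PySem.Chars.find rest ['$'] := by
        have := PySem.Chars.neg_one_le_find (s := rest) (sub := ['$'])
        omega
      obtain ⟨hlt, hget, hdecomp, hpre⟩ := pv_find_decomp '$' rest h0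
      have hplen : (rest.take (PySem.Chars.find rest ['$']).toNat).length
          = (PySem.Chars.find rest ['$']).toNat := by
        simp [List.length_take]; omega
      have ihh : pvFixLineA (rest.drop ((PySem.Chars.find rest ['$']).toNat + 1))
          = pvFixLineB (rest.drop ((PySem.Chars.find rest ['$']).toNat + 1)) := ih
      have hAunf : pvFixLineA ('$' :: rest) =
          ('$' :: rest.take ((PySem.Chars.find rest ['$']).toNat + 1)) ++
            pvFixLineB (rest.drop ((PySem.Chars.find rest ['$']).toNat + 1)) := by
        rw [← ihh]; simp [pvFixLineA, hj']
      have htake : rest.take ((PySem.Chars.find rest ['$']).toNat + 1)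
          = rest.take (PySem.Chars.find rest ['$']).toNat ++ ['$'] := by
        rw [List.take_succ, hget]
        rfl
      have hcount : ('$'::rest).count '$'
          = 2 + (rest.drop ((PySem.Chars.find rest ['$']).toNat + 1)).count '$' := by
        conv_lhs => rw [hdecomp]
        simp [List.count_cons, List.count_append, List.count_eq_zero.mpr hpre]
        omega
      by_cases hpar : (rest.drop ((PySem.Chars.find rest ['$']).toNat + 1)).count '$' % 2 = 1
      · have hmem : '$' ∈ rest.drop ((PySem.Chars.find rest ['$']).toNat + 1) :=
          List.count_pos_iff.mp (by omega)
        have hk' := pv_rfind_nonneg '$' _ hmem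
        have hcs : ('$'::rest)
            = ('$' :: (rest.take (PySem.Chars.find rest ['$']).toNat ++ ['$'])) ++
                rest.drop ((PySem.Chars.find rest ['$']).toNat + 1) := by
          conv_lhs => rw [hdecomp]
          simp
        have hxslen : ('$' :: (rest.take (PySem.Chars.find rest ['$']).toNat ++ ['$'])).length
            = (PySem.Chars.find rest ['$']).toNat + 2 := by
          simp [hplen]
        have hrf : PySem.Chars.rfind ('$'::rest) ['$']
            = (((PySem.Chars.find rest ['$']).toNat + 2 : Nat) : Int) +
                PySem.Chars.rfind (rest.drop ((PySem.Chars.find rest ['$']).toNat + 1)) ['$'] := by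
          conv_lhs => rw [hcs]
          rw [pv_rfind_append _ _ _ hmem, hxslen]
        have hcnt1 : ('$'::rest).count '$' % 2 = 1 := by omega
        rw [hAunf, pv_B_odd _ hpar, pv_B_odd _ hcnt1, hrf]
        have htn : ((((PySem.Chars.find rest ['$']).toNat + 2 : Nat) : Int) +
            PySem.Chars.rfind (rest.drop ((PySem.Chars.find rest ['$']).toNat + 1)) ['$']).toNat
            = ('$' :: (rest.take (PySem.Chars.find rest ['$']).toNat ++ ['$'])).length +
              (PySem.Chars.rfind (rest.drop ((PySem.Chars.find rest ['$']).toNat + 1)) ['$']).toNat := by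
          rw [hxslen]; omega
        rw [htn]
        conv_rhs => rw [hcs]
        rw [pv_drop_len_add, pv_take_len_add]
        split_ifs <;> simp [htake, List.append_assoc]
      · have hcnt0 : ('$'::rest).count '$' % 2 = 0 := by omega
        rw [pv_B_even _ hcnt0, hAunf, pv_B_even _ (by omega), htake]
        conv_rhs => rw [hdecomp]
        simp
  | case5 c rest hc ih =>
      have hAunf : pvFixLineA (c :: rest) = c :: pvFixLineB rest := by
        rw [← ih]; simp [pvFixLineA, hc]
      have hcount : (c::rest).count '$' = rest.count '$' := by
        simp [List.count_cons, hc]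
      by_cases hpar : rest.count '$' % 2 = 1
      · have hmem : '$' ∈ rest := List.count_pos_iff.mp (by omega)
        have hk' := pv_rfind_nonneg '$' rest hmem
        have hne : PySem.Chars.rfind rest ['$'] ≠ -1 := by
          rw [ne_eq, pv_rfind_neg_iff]; simpa using hmem
        have hrf : PySem.Chars.rfind (c::rest) ['$'] = 1 + PySem.Chars.rfind rest ['$'] := by
          rw [pv_rfind_cons, if_neg hne]
        rw [hAunf, pv_B_odd _ hpar, pv_B_odd _ (by omega : (c::rest).count '$' % 2 = 1), hrf]
        have htn : (1 + PySem.Chars.rfind rest ['$']).toNat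
            = (PySem.Chars.rfind rest ['$']).toNat + 1 := by omega
        rw [htn]
        simp only [List.drop_succ_cons, List.take_succ_cons]
        split_ifs <;> simp
      · rw [pv_B_even _ (by omega), hAunf, pv_B_even _ (by omega)]

theorem pv_lineB_skip (cs : List Char)
    (h : ¬ (PySem.Chars.isIn ['$'] cs && PySem.Chars.isIn ['\\','}'] cs) = true) :
    pvFixLineB cs = cs := by
  by_cases hpar : cs.count '$' % 2 = 1
  · have hmem : '$' ∈ cs := List.count_pos_iff.mp (by omega)
    have hds : PySem.Chars.isIn ['$'] cs = true := (pv_isIn_singleton _ _).mpr hmem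
    have hbr : PySem.Chars.isIn ['\\','}'] cs = false := by
      cases hx : PySem.Chars.isIn ['\\','}'] cs
      · rfl
      · exact absurd (by rw [hds, hx]; rfl) h
    rw [pv_B_odd _ hpar]
    rw [if_neg]
    intro hb
    simp only [Bool.and_eq_true] at hb
    have hinf : ['\\','}'] <:+: cs :=
      ((PySem.Chars.isIn_iff_infix _ _).mp hb.1).trans
        (List.drop_suffix _ _).isInfix
    rw [PySem.Chars.isIn_eq_false_iff] at hbr
    exact hbr hinf
  · exact pv_B_even _ (by omega)

-- ===== VERDICT (by name: the statement is the Claim_ definition above) =====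
theorem fix_broken_math_braces_py_spec : Claim_equal_fix_broken_math_braces_py := by
  intro tex _
  unfold Spec_fix_broken_math_braces_py fix_broken_math_braces_py fix_broken_math_braces_py_alt
  simp only [PySem.List.foldl_append_singleton_eq_map, List.nil_append]
  congr 2
  apply List.map_congr_left
  intro line _
  by_cases h : (PySem.Chars.isIn ['$'] line && PySem.Chars.isIn ['\\','}'] line) = true
  · simp [h, pv_lineAB]
  · simp [h, pv_lineB_skip line h]
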